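-- pv_equiv track=rewrite | github.com/jiashenC/langcache | langcache/core.py | _replace_str
-- ===== SOURCE A (Python) =====
-- def _replace_str(string: str):
--     replace_list = [
--         ('"', "'"),
--         (";", "."),
--     ]
--     for prev, cur in replace_list:
--         string = string.replace(prev, cur)
--     return string
-- ===== SOURCE B (Python) =====
-- def _replace_str(string: str):
--     mapping = {'"': "'", ';': '.'}
--     out = []
--     for ch in string:
--         out.append(mapping.get(ch, ch))
--     return ''.join(out)
-- ===== Notes on version B (the rewrite author's own statement) =====
-- stated objective: alternative
-- what changed: Replaces the two sequential full-string str.replace passes with a single traversal of the string driven by a dict lookup table, appending mapping.get(ch, ch) for each character and joining once.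
import Mathlib
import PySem

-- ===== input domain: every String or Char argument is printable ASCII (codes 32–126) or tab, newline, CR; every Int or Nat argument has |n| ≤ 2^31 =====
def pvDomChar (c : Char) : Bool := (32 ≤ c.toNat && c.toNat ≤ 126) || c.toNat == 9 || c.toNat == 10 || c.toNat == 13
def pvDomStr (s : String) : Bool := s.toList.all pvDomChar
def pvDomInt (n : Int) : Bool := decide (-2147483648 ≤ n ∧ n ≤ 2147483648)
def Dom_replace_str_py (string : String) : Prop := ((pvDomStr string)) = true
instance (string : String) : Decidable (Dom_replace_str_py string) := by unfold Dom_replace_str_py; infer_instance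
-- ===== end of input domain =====

-- B replaces A's two sequential full-string replace passes with a single per-character pass over a lookup table (objective: alternative).

-- ===== PORT A =====
def replace_str_py (string : String) : String :=
  let replace_list : List (String × String) := [("\"", "'"), (";", ".")]
  replace_list.foldl (fun s pc => PySem.Str.replace s pc.1 pc.2) string

-- ===== PORT B =====
def replaceMapping : PySem.Dict Char Char :=
  (PySem.Dict.empty.insert '"' '\'').insert ';' '.'

def replace_str_py_alt (string : String) : String :=
  let out := string.toList.foldl (fun acc ch => acc ++ [replaceMapping.getD ch ch]) []
  String.ofList (PySem.Chars.join [] (out.map (fun c => [c])))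

-- ===== PRECONDITION & SPEC =====
def Spec_replace_str_py (string : String) (out : String) : Prop := out = replace_str_py_alt string
instance (string : String) (out : String) : Decidable (Spec_replace_str_py string out) := by unfold Spec_replace_str_py; infer_instance

-- ===== CLAIM (what is proved, stated in full; the proofs are below) =====
def Claim_equal_replace_str_py : Prop := ∀ (string : String), Dom_replace_str_py string → Spec_replace_str_py string (replace_str_py string)

-- ===== LEMMAS AND PROOFS =====

-- single-character replace is a map over the characters
theorem replace_go_single (o n : Char) (l acc : List Char) :
    PySem.Chars.replace.go [o] [n] l.length l acc
      = acc.reverse ++ l.map (fun c => if c = o then n else c) := by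
  induction l generalizing acc with
  | nil => simp [PySem.Chars.replace.go]
  | cons c t ih =>
    rw [List.length_cons, PySem.Chars.replace.go]
    by_cases h : c = o
    · subst h
      simp only [List.isPrefixOf, Bool.and_true, beq_self_eq_true,
        if_pos, List.length_singleton, List.drop_succ_cons, List.drop_zero, List.reverse_singleton]
      rw [ih]
      simp
    · have : [o].isPrefixOf (c :: t) = false := by
        simp [List.isPrefixOf]
        exact fun hco => absurd hco.symm h
      rw [this]
      simp only [Bool.false_eq_true, if_false]
      rw [ih]
      simp [h]

theorem replace_single (o n : Char) (l : List Char) :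
    PySem.Chars.replace l [o] [n] = l.map (fun c => if c = o then n else c) := by
  simpa using replace_go_single o n l []

theorem getD_mapping (c : Char) :
    replaceMapping.getD c c
      = (if (if c = '"' then '\'' else c) = ';' then '.' else if c = '"' then '\'' else c) := by
  by_cases h1 : c = '"'
  · subst h1; decide
  · by_cases h2 : c = ';'
    · subst h2; decide
    · have e1 : ('\"' == c) = false := beq_eq_false_iff_ne.mpr (Ne.symm h1)
      have e2 : ((';' : Char) == c) = false := beq_eq_false_iff_ne.mpr (Ne.symm h2)
      simp only [if_neg h1, if_neg h2]
      simp [replaceMapping, PySem.Dict.getD, PySem.Dict.get?, PySem.Dict.insert, PySem.Dict.empty,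
        List.find?, e1, e2]


theorem out_foldl_eq_map (l : List Char) :
    l.foldl (fun acc ch => acc ++ [replaceMapping.getD ch ch]) []
      = l.map (fun ch => replaceMapping.getD ch ch) := by
  have h : ∀ (l : List Char) (acc : List Char),
      l.foldl (fun acc ch => acc ++ [replaceMapping.getD ch ch]) acc
        = acc ++ l.map (fun ch => replaceMapping.getD ch ch) := by
    intro l
    induction l with
    | nil => simp
    | cons c t ih => intro acc; simp [List.foldl_cons, ih]
  simpa using h l []

-- ===== VERDICT (by name: the statement is the Claim_ definition above) =====
theorem replace_str_py_spec : Claim_equal_replace_str_py := by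
  intro s _
  unfold Spec_replace_str_py replace_str_py replace_str_py_alt
  rw [out_foldl_eq_map]
  simp only [List.foldl_cons, List.foldl_nil]
  apply String.toList_injective
  rw [PySem.Str.toList_replace, PySem.Str.toList_replace]
  have hq : ("\"" : String).toList = ['"'] := by decide
  have hq' : ("'" : String).toList = ['\''] := by decide
  have hs : (";" : String).toList = [';'] := by decide
  have hd : ("." : String).toList = ['.'] := by decide
  rw [hq, hq', hs, hd, replace_single, replace_single]
  rw [PySem.Chars.join_nil_singletons]
  rw [String.toList_ofList, List.map_map]
  apply List.map_congr_left
  intro c _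
  simp only [Function.comp_apply, getD_mapping c]
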